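-- pv_equiv track=rewrite | github.com/barahona-research-group/ICE-NODE | icenode/ehr_model/coding_scheme.py | _dfs_edges
-- ===== SOURCE A (Python) =====
-- def _dfs_edges(connection, code):
--     result = set()
--
--     def _edges(_node):
--         for conn in connection.get(_node, []):
--             result.add((_node, conn))
--             _edges(conn)
--
--     _edges(code)
--     return result
-- ===== SOURCE B (Python) =====
-- def _dfs_edges(connection, code):
--     result = set()
--     stack = [(code, list(connection.get(code, [])))]
--     while stack:
--         node, conns = stack.pop()
--         if conns:
--             head = conns[0]
--             stack.append((node, conns[1:]))
--             result.add((node, head))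
--             stack.append((head, list(connection.get(head, []))))
--     return result
-- ===== Notes on version B (the rewrite author's own statement) =====
-- stated objective: alternative
-- what changed: the recursive nested-closure DFS is replaced by an iterative traversal driven by an explicit stack of (node, pending-successors) frames; no recursion remains
import Mathlib
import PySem

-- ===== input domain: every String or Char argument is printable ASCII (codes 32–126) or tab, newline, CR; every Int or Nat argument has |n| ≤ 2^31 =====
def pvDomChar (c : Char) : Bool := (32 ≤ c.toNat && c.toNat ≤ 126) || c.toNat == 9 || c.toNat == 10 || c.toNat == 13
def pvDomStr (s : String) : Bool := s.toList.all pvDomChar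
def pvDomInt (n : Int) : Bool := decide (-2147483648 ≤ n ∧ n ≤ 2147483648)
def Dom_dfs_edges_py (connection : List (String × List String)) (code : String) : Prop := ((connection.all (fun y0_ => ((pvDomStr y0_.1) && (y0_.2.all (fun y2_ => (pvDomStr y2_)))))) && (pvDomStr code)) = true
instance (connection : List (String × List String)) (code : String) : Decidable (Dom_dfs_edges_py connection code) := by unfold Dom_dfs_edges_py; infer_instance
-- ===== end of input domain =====

-- B replaces the recursive nested-closure DFS by an iterative explicit-stack traversal
-- (frames of node × pending successors); same edge set, no recursion.
-- Both ports use a fuel counter only to make the (Python-divergent-on-cycles) recursion total;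
-- under Pre_ (no cycle reachable from `code`) the fuel is never exhausted.

-- connection.get(n, []) — shared helper: the same Python expression occurs in A and in B
def pvSuccs (connection : List (String × List String)) (n : String) : List String :=
  PySem.Dict.getD (PySem.Dict.mk connection) n []

-- fuel bound: more than the number of edge-processing steps of the DFS on any acyclic input
def pvFuel (connection : List (String × List String)) : Nat :=
  (connection.foldl (fun a p => a + p.2.length) 0 + 2) ^ (connection.length + 2)

-- ===== PORT A =====
-- _edges(_node): for conn in connection.get(_node, []): result.add((_node, conn)); _edges(conn)
-- fuel counts processed edges and is threaded through (subtype records it never grows).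
def pvLoopA (connection : List (String × List String)) :
    (fuel : Nat) → String → List String → PySem.Set (String × String) →
      {p : Nat × PySem.Set (String × String) // p.1 ≤ fuel}
  | fuel, _, [], res => ⟨(fuel, res), le_refl _⟩
  | 0, _, _ :: _, res => ⟨(0, res), le_refl _⟩
  | fuel+1, n, c :: cs, res =>
      let r1 := pvLoopA connection fuel c (pvSuccs connection c) (PySem.Set.add res (n, c))
      let r2 := pvLoopA connection r1.val.1 n cs r1.val.2
      ⟨r2.val, le_trans r2.property (le_trans r1.property (Nat.le_succ _))⟩
  termination_by fuel _ _ _ => fuel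
  decreasing_by
  · exact Nat.lt_succ_self _
  · exact Nat.lt_succ_of_le r1.property

def dfs_edges_py (connection : List (String × List String)) (code : String) : List (String × String) :=
  (pvLoopA connection (pvFuel connection) code (pvSuccs connection code) PySem.Set.empty).val.2

-- ===== PORT B =====
-- while stack: node, conns = stack.pop(); if conns: push (node, rest); add edge; push (head, succs head)
def pvRunB (connection : List (String × List String)) :
    Nat → List (String × List String) → PySem.Set (String × String) →
      Nat × PySem.Set (String × String)
  | f, [], res => (f, res)
  | f, (_, []) :: st, res => pvRunB connection f st res
  | 0, (_, _ :: _) :: _, res => (0, res)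
  | f+1, (n, c :: cs) :: st, res =>
      pvRunB connection f ((c, pvSuccs connection c) :: (n, cs) :: st) (PySem.Set.add res (n, c))
  termination_by f st _ => (f, st.length)

def dfs_edges_py_alt (connection : List (String × List String)) (code : String) : List (String × String) :=
  (pvRunB connection (pvFuel connection) [(code, pvSuccs connection code)] PySem.Set.empty).2

-- ===== PRECONDITION & SPEC =====
-- one expansion round of reachability
def pvReach (connection : List (String × List String)) (x : String) : List String :=
  (fun S => PySem.Set.update S (S.flatMap (pvSuccs connection)))^[connection.length + 1] [x]

-- Pre_ excludes exactly the inputs on which a cycle is reachable from `code`: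
-- there Python A recurses forever (RecursionError), returning nothing.
def Pre_dfs_edges_py (connection : List (String × List String)) (code : String) : Prop :=
  ∀ p ∈ connection, p.1 ∈ pvReach connection code →
    p.1 ∉ (pvSuccs connection p.1).flatMap (pvReach connection)

instance (connection : List (String × List String)) (code : String) : Decidable (Pre_dfs_edges_py connection code) := by
  unfold Pre_dfs_edges_py; infer_instance

def pvWitness_dfs_edges_py : (List (String × List String)) × String :=
  ([("a", ["b", "c"]), ("b", ["c"])], "a")

def Spec_dfs_edges_py (connection : List (String × List String)) (code : String) (out : List (String × String)) : Prop := out = dfs_edges_py_alt connection code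
instance (connection : List (String × List String)) (code : String) (out : List (String × String)) : Decidable (Spec_dfs_edges_py connection code out) := by unfold Spec_dfs_edges_py; infer_instance

-- ===== CLAIM (what is proved, stated in full; the proofs are below) =====
def Claim_equal_dfs_edges_py : Prop := ∀ (connection : List (String × List String)) (code : String), Dom_dfs_edges_py connection code → Pre_dfs_edges_py connection code → Spec_dfs_edges_py connection code (dfs_edges_py connection code)

-- ===== LEMMAS AND PROOFS =====

lemma pvRunB_zero (connection : List (String × List String))
    (st : List (String × List String)) (res : PySem.Set (String × String)) :
    pvRunB connection 0 st res = (0, res) := by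
  induction st with
  | nil => simp [pvRunB]
  | cons p st ih =>
      obtain ⟨n, cs⟩ := p
      cases cs with
      | nil => simpa [pvRunB] using ih
      | cons c cs => simp [pvRunB]

lemma pvRunB_loopA (connection : List (String × List String)) :
    ∀ (f : Nat) (n : String) (cs : List String)
      (st : List (String × List String)) (res : PySem.Set (String × String)),
      pvRunB connection f ((n, cs) :: st) res =
        pvRunB connection (pvLoopA connection f n cs res).val.1 st
          (pvLoopA connection f n cs res).val.2 := by
  intro f
  induction f using Nat.strong_induction_on with
  | _ f ih =>
    intro n cs st res
    cases cs with
    | nil => simp [pvRunB, pvLoopA]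
    | cons c cs =>
      cases f with
      | zero => simp [pvLoopA, pvRunB_zero]
      | succ f =>
        rw [show pvRunB connection (f+1) ((n, c :: cs) :: st) res =
              pvRunB connection f ((c, pvSuccs connection c) :: (n, cs) :: st)
                (PySem.Set.add res (n, c)) from by simp [pvRunB]]
        rw [ih f (Nat.lt_succ_self f)]
        rw [ih _ (Nat.lt_succ_of_le
              (pvLoopA connection f c (pvSuccs connection c)
                (PySem.Set.add res (n, c))).property)]
        rw [show pvLoopA connection (f+1) n (c :: cs) res =
              (let r1 := pvLoopA connection f c (pvSuccs connection c) (PySem.Set.add res (n, c))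
               let r2 := pvLoopA connection r1.val.1 n cs r1.val.2
               ⟨r2.val, le_trans r2.property (le_trans r1.property (Nat.le_succ _))⟩) from by
          rw [pvLoopA]]

-- ===== VERDICT (by name: the statement is the Claim_ definition above) =====
theorem dfs_edges_py_spec : Claim_equal_dfs_edges_py := by
  intro connection code _ _
  unfold Spec_dfs_edges_py dfs_edges_py dfs_edges_py_alt
  rw [pvRunB_loopA]
  simp [pvRunB]
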